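-- pv_equiv track=rewrite | github.com/jtrinklein/advent-of-code | 2020/14/main.py | update_mask
-- ===== SOURCE A (Python) =====
-- def update_mask(bits):
--     set_mask = clear_mask = 0
--     offset = len(bits)-1
--     for i,b in enumerate(bits):
--         if b == '1':
--             set_mask |= 1 << (offset - i)
--         elif b == '0':
--             clear_mask |= 1 << (offset - i)
--     return set_mask, clear_mask
-- ===== SOURCE B (Python) =====
-- def update_mask(bits):
--     # Transform-then-parse: build the two binary strings, then let int(s, 2)
--     # do the base-2 conversion; no shifting/OR accumulator at all.
--     if not bits:
--         return (0, 0)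
--     set_s = ''.join('1' if b == '1' else '0' for b in bits)
--     clr_s = ''.join('1' if b == '0' else '0' for b in bits)
--     return int(set_s, 2), int(clr_s, 2)
-- ===== Notes on version B (the rewrite author's own statement) =====
-- stated objective: idiomatic
-- what changed: Replaces A's single enumerate loop that ORs individually shifted bits into two accumulators by a transform-then-parse decomposition: map each char to '1'/'0' to build two binary strings and convert each with int(s, 2) (with a trivial empty-string case returning (0, 0)).
import Mathlib
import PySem

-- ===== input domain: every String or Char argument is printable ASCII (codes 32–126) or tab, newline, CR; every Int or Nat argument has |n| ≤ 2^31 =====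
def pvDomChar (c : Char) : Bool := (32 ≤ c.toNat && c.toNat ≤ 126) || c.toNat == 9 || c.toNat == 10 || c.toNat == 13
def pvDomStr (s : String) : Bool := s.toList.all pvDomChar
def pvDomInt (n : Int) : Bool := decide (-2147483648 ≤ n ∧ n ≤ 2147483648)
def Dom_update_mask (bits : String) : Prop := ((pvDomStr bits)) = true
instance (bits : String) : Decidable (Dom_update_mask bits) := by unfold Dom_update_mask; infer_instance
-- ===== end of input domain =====

-- B replaces A's enumerate/offset/shift/OR loop by a transform-then-parse
-- decomposition (map chars to '1'/'0' strings, then base-2 parse); objective: idiomatic.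


-- ===== PORT A =====
-- loop body of A; Python's `1 << (offset - i)` shifts by offset - i, which is
-- ≥ 0 on every iteration (i ≤ len(bits) - 1), so `.toNat` is exact here
def updateBody (offset : Int) (st : Int × Int) (p : Int × Char) : Int × Int :=
  if p.2 = '1' then (PySem.Int.bor st.1 ((1 : Int) <<< (offset - p.1).toNat), st.2)
  else if p.2 = '0' then (st.1, PySem.Int.bor st.2 ((1 : Int) <<< (offset - p.1).toNat))
  else st

def update_mask (bits : String) : Int × Int :=
  (PySem.List.enumerate bits.toList).foldl (updateBody (PySem.Str.len bits - 1)) (0, 0)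

-- ===== PORT B =====
-- hand port of Python's int(s, 2): exact for the nonempty strings of '0'/'1'
-- that B builds (left-to-right base-2 accumulation)
def parseBin (s : List Char) : Int :=
  s.foldl (fun a c => a * 2 + (if c = '1' then 1 else 0)) 0

def update_mask_alt (bits : String) : Int × Int :=
  if bits.toList = [] then (0, 0)
  else (parseBin (bits.toList.map (fun b => if b = '1' then '1' else '0')),
        parseBin (bits.toList.map (fun b => if b = '0' then '1' else '0')))

-- ===== PRECONDITION & SPEC =====
def Spec_update_mask (bits : String) (out : Int × Int) : Prop := out = update_mask_alt bits
instance (bits : String) (out : Int × Int) : Decidable (Spec_update_mask bits out) := by unfold Spec_update_mask; infer_instance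

-- ===== CLAIM (what is proved, stated in full; the proofs are below) =====
def Claim_equal_update_mask : Prop := ∀ (bits : String), Dom_update_mask bits → Spec_update_mask bits (update_mask bits)

-- ===== LEMMAS AND PROOFS =====
def bS (b : Char) : Nat := if b = '1' then 1 else 0
def bC (b : Char) : Nat := if b = '0' then 1 else 0
def hS (xs : List Char) (v : Nat) : Nat := xs.foldl (fun a b => a * 2 + bS b) v
def hC (xs : List Char) (w : Nat) : Nat := xs.foldl (fun a b => a * 2 + bC b) w

-- OR-ing a fresh low bit below all set bits is addition
theorem mylor : ∀ (k a : Nat), (a * 2 ^ (k + 1)) ||| 2 ^ k = a * 2 ^ (k + 1) + 2 ^ k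
  | 0, a => by
      have h := Nat.lor_bit false a true 0
      simp [Nat.bit] at h
      simpa [Nat.mul_comm] using h
  | k + 1, a => by
      have ih := mylor k a
      have h := Nat.lor_bit false (a * 2 ^ (k + 1)) false (2 ^ k)
      simp [Nat.bit, ih] at h
      have e1 : a * 2 ^ (k + 1 + 1) = 2 * (a * 2 ^ (k + 1)) := by ring
      have e2 : (2 : Nat) ^ (k + 1) = 2 * 2 ^ k := by ring
      rw [e2] at h
      rw [e1, e2, h]; ring

theorem one_shiftLeft_int (n : Nat) : (1 : Int) <<< n = ((2 ^ n : Nat) : Int) := by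
  simp [Int.shiftLeft_eq']

-- B's parse of the mapped set-string is the Horner value hS (and dually hC)
theorem parse_map_S : ∀ (xs : List Char) (v : Nat),
    (xs.map (fun b => if b = '1' then '1' else '0')).foldl
        (fun a c => a * 2 + (if c = '1' then (1 : Int) else 0)) ((v : Nat) : Int)
    = ((hS xs v : Nat) : Int)
  | [], v => by simp [hS]
  | x :: t, v => by
      have ih := parse_map_S t (v * 2 + bS x)
      simp only [List.map_cons, List.foldl_cons]
      rw [show ((v : Nat) : Int) * 2 + (if (if x = '1' then '1' else '0') = '1' then (1 : Int) else 0)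
            = ((v * 2 + bS x : Nat) : Int) by
          by_cases h : x = '1' <;> simp [bS, h], ih]
      simp only [hS, List.foldl_cons]

theorem parse_map_C : ∀ (xs : List Char) (w : Nat),
    (xs.map (fun b => if b = '0' then '1' else '0')).foldl
        (fun a c => a * 2 + (if c = '1' then (1 : Int) else 0)) ((w : Nat) : Int)
    = ((hC xs w : Nat) : Int)
  | [], w => by simp [hC]
  | x :: t, w => by
      have ih := parse_map_C t (w * 2 + bC x)
      simp only [List.map_cons, List.foldl_cons]
      rw [show ((w : Nat) : Int) * 2 + (if (if x = '0' then '1' else '0') = '1' then (1 : Int) else 0)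
            = ((w * 2 + bC x : Nat) : Int) by
          by_cases h : x = '0' <;> simp [bC, h], ih]
      simp only [hC, List.foldl_cons]

-- A's invariant: the accumulated masks are the Horner values of the processed
-- prefix shifted up by the remaining length
theorem a_loop : ∀ (xs : List Char) (j v w : Nat),
    (PySem.List.enumerate xs (j : Int)).foldl
        (updateBody ((j : Int) + (xs.length : Int) - 1))
        (((v * 2 ^ xs.length : Nat) : Int), ((w * 2 ^ xs.length : Nat) : Int))
    = (((hS xs v : Nat) : Int), ((hC xs w : Nat) : Int))
  | [], j, v, w => by simp [PySem.List.enumerate_nil, hS, hC]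
  | x :: t, j, v, w => by
      have ih := a_loop t (j + 1) (v * 2 + bS x) (w * 2 + bC x)
      rw [PySem.List.enumerate_cons]
      simp only [List.foldl_cons]
      have hsh : (((j : Int) + ((x :: t).length : Int) - 1) - (j : Int)).toNat
          = t.length := by push_cast [List.length_cons]; omega
      have hstep : updateBody ((j : Int) + ((x :: t).length : Int) - 1)
            (((v * 2 ^ (x :: t).length : Nat) : Int), ((w * 2 ^ (x :: t).length : Nat) : Int))
            ((j : Int), x)
          = ((((v * 2 + bS x) * 2 ^ t.length : Nat) : Int),
             (((w * 2 + bC x) * 2 ^ t.length : Nat) : Int)) := by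
        unfold updateBody
        rw [hsh]
        simp only [one_shiftLeft_int]
        by_cases h1 : x = '1'
        · subst h1
          rw [if_pos rfl, PySem.Int.bor_natCast]
          simp only [Prod.mk.injEq, Nat.cast_inj]
          constructor
          · rw [List.length_cons, mylor]; simp [bS]; ring
          · simp [bC]; ring
        · by_cases h0 : x = '0'
          · subst h0
            rw [if_neg (by decide), if_pos rfl, PySem.Int.bor_natCast]
            simp only [Prod.mk.injEq, Nat.cast_inj]
            constructor
            · simp [bS]; ring
            · rw [List.length_cons, mylor]; simp [bC]; ring
          · rw [if_neg h1, if_neg h0]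
            simp only [Prod.mk.injEq, Nat.cast_inj]
            constructor
            · simp [bS, h1]; ring
            · simp [bC, h0]; ring
      have hoff : ((j : Int) + ((x :: t).length : Int) - 1)
          = (((j + 1 : Nat) : Int) + (t.length : Int) - 1) := by
        push_cast [List.length_cons]; ring
      have hj : ((j : Int) + 1) = ((j + 1 : Nat) : Int) := by push_cast; ring
      rw [hstep, hoff, hj, ih]
      simp only [hS, hC, List.foldl_cons]

-- ===== VERDICT (by name: the statement is the Claim_ definition above) =====
theorem update_mask_spec : Claim_equal_update_mask := by
  intro bits _
  unfold Spec_update_mask update_mask update_mask_alt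
  by_cases hnil : bits.toList = []
  · simp [hnil, PySem.List.enumerate_nil]
  · rw [if_neg hnil]
    have hlen : PySem.Str.len bits - 1 = ((0 : Nat) : Int) + (bits.toList.length : Int) - 1 := by
      simp [PySem.Str.len]
    have hinit : ((0 : Int), (0 : Int))
        = ((((0 * 2 ^ bits.toList.length : Nat)) : Int), (((0 * 2 ^ bits.toList.length : Nat)) : Int)) := by
      simp
    rw [hlen, hinit, show PySem.List.enumerate bits.toList = PySem.List.enumerate bits.toList ((0 : Nat) : Int) by norm_num,
      a_loop bits.toList 0 0 0]
    have hs := parse_map_S bits.toList 0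
    have hc := parse_map_C bits.toList 0
    norm_num at hs hc
    rw [parseBin, parseBin, ← hs, ← hc]
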